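-- pv_equiv track=rewrite | github.com/nickodell/lc3-cc | compile.py | store_register_fp_rel
-- ===== SOURCE A (Python) =====
-- def asm(arg): return [arg + "\n"]
--
-- def within_6bit_twos_complement(n):
--     return -(2**5) <= n <= (2**5)-1
--
-- def store_register_fp_rel(source_reg, temp_reg, fp_offset, comment=""):
--     assert source_reg != temp_reg
--     a = []
--     fp_reg = 5
--     while not within_6bit_twos_complement(fp_offset):
--         if fp_offset > 0:
--             a += asm("ADD R%d, R%d, #15" % (temp_reg, fp_reg))
--             fp_offset -= 15
--         else:
--             a += asm("ADD R%d, R%d, #-16" % (temp_reg, fp_reg))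
--             fp_offset += 16
--         fp_reg = temp_reg
--     a += asm("STR R%d, R%d, #%d%s" % (source_reg, fp_reg, fp_offset, comment))
--     return a
-- ===== SOURCE B (Python) =====
-- def _steps(source_reg, temp_reg, k, residual, imm, comment):
--     if k == 0:
--         return ["STR R%d, R5, #%d%s\n" % (source_reg, residual, comment)]
--     step = "ADD R%d, R%d, #%s\n"
--     return ([step % (temp_reg, 5, imm)]
--             + [step % (temp_reg, temp_reg, imm)] * (k - 1)
--             + ["STR R%d, R%d, #%d%s\n" % (source_reg, temp_reg, residual, comment)])
--
-- def store_register_fp_rel(source_reg, temp_reg, fp_offset, comment=""):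
--     assert source_reg != temp_reg
--     if fp_offset > 31:
--         k = -((31 - fp_offset) // 15)          # ceil((fp_offset - 31) / 15)
--         return _steps(source_reg, temp_reg, k, fp_offset - 15 * k, "15", comment)
--     if fp_offset < -32:
--         k = -((fp_offset + 32) // 16)          # ceil((-32 - fp_offset) / 16)
--         return _steps(source_reg, temp_reg, k, fp_offset + 16 * k, "-16", comment)
--     return _steps(source_reg, temp_reg, 0, fp_offset, "", comment)
-- ===== Notes on version B (the rewrite author's own statement) =====
-- stated objective: faster
-- what changed: Replaces A's step-by-step subtraction loop (one ADD emitted per iteration test) by a closed-form ceiling-division step count k and residual offset, building the output with one list-replicate instead of iterating the loop condition.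
import Mathlib
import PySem

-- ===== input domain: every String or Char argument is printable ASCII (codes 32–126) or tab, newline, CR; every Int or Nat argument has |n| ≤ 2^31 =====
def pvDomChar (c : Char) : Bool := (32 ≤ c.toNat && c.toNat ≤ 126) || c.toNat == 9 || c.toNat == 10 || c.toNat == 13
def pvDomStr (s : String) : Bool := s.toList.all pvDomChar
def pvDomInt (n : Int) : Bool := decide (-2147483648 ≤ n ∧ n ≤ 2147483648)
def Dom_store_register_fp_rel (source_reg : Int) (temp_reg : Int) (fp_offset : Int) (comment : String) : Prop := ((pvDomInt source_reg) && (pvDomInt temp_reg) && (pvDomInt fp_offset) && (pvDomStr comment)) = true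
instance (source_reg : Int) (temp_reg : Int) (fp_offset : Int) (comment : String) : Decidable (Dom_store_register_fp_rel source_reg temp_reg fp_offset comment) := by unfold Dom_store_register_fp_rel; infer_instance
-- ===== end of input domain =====

-- B replaces A's per-step subtraction loop by a closed-form step count and residual (objective: faster).

-- ===== PORT A =====
def pyAsm (arg : String) : List String := [arg ++ "\n"]

def within_6bit_twos_complement (n : Int) : Bool := decide (-(2^5 : Int) ≤ n ∧ n ≤ (2^5 : Int) - 1)

-- the while loop of A: state (a, fp_reg, fp_offset); temp_reg is constant through the loop
def srfrLoop (temp_reg : Int) (a : List String) (fp_reg : Int) (fp_offset : Int) :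
    List String × Int × Int :=
  if within_6bit_twos_complement fp_offset then (a, fp_reg, fp_offset)
  else if fp_offset > 0 then
    srfrLoop temp_reg
      (a ++ pyAsm ("ADD R" ++ PySem.Int.toStr temp_reg ++ ", R" ++ PySem.Int.toStr fp_reg ++ ", #15"))
      temp_reg (fp_offset - 15)
  else
    srfrLoop temp_reg
      (a ++ pyAsm ("ADD R" ++ PySem.Int.toStr temp_reg ++ ", R" ++ PySem.Int.toStr fp_reg ++ ", #-16"))
      temp_reg (fp_offset + 16)
termination_by (fp_offset - 31).toNat + (-32 - fp_offset).toNat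
decreasing_by
  all_goals simp only [within_6bit_twos_complement, decide_eq_true_eq, not_and, not_le] at *
  all_goals omega

def store_register_fp_rel (source_reg : Int) (temp_reg : Int) (fp_offset : Int) (comment : String) : List String :=
  let r := srfrLoop temp_reg [] 5 fp_offset
  r.1 ++ pyAsm ("STR R" ++ PySem.Int.toStr source_reg ++ ", R" ++ PySem.Int.toStr r.2.1 ++ ", #" ++ PySem.Int.toStr r.2.2 ++ comment)

-- ===== PORT B =====
def bSteps (source_reg : Int) (temp_reg : Int) (k : Int) (residual : Int) (imm : String) (comment : String) : List String :=
  if k == 0 then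
    ["STR R" ++ PySem.Int.toStr source_reg ++ ", R5, #" ++ PySem.Int.toStr residual ++ comment ++ "\n"]
  else
    ("ADD R" ++ PySem.Int.toStr temp_reg ++ ", R" ++ PySem.Int.toStr 5 ++ ", #" ++ imm ++ "\n")
      :: List.replicate (k - 1).toNat
           ("ADD R" ++ PySem.Int.toStr temp_reg ++ ", R" ++ PySem.Int.toStr temp_reg ++ ", #" ++ imm ++ "\n")
      ++ ["STR R" ++ PySem.Int.toStr source_reg ++ ", R" ++ PySem.Int.toStr temp_reg ++ ", #" ++ PySem.Int.toStr residual ++ comment ++ "\n"]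

def store_register_fp_rel_alt (source_reg : Int) (temp_reg : Int) (fp_offset : Int) (comment : String) : List String :=
  if fp_offset > 31 then
    bSteps source_reg temp_reg (-(PySem.Int.floordiv (31 - fp_offset) 15))
      (fp_offset - 15 * -(PySem.Int.floordiv (31 - fp_offset) 15)) "15" comment
  else if fp_offset < -32 then
    bSteps source_reg temp_reg (-(PySem.Int.floordiv (fp_offset + 32) 16))
      (fp_offset + 16 * -(PySem.Int.floordiv (fp_offset + 32) 16)) "-16" comment
  else
    bSteps source_reg temp_reg 0 fp_offset "" comment

-- ===== PRECONDITION & SPEC =====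
-- Pre_ excludes exactly source_reg = temp_reg, where Python A raises AssertionError (B asserts likewise).
def Pre_store_register_fp_rel (source_reg : Int) (temp_reg : Int) (fp_offset : Int) (comment : String) : Prop :=
  source_reg ≠ temp_reg
instance (source_reg : Int) (temp_reg : Int) (fp_offset : Int) (comment : String) : Decidable (Pre_store_register_fp_rel source_reg temp_reg fp_offset comment) := by unfold Pre_store_register_fp_rel; infer_instance

def pvWitness_store_register_fp_rel : Int × Int × Int × String := (0, 1, 40, " ; save x")

def Spec_store_register_fp_rel (source_reg : Int) (temp_reg : Int) (fp_offset : Int) (comment : String) (out : List String) : Prop := out = store_register_fp_rel_alt source_reg temp_reg fp_offset comment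
instance (source_reg : Int) (temp_reg : Int) (fp_offset : Int) (comment : String) (out : List String) : Decidable (Spec_store_register_fp_rel source_reg temp_reg fp_offset comment out) := by unfold Spec_store_register_fp_rel; infer_instance

-- ===== CLAIM (what is proved, stated in full; the proofs are below) =====
def Claim_equal_store_register_fp_rel : Prop := ∀ (source_reg : Int) (temp_reg : Int) (fp_offset : Int) (comment : String), Dom_store_register_fp_rel source_reg temp_reg fp_offset comment → Pre_store_register_fp_rel source_reg temp_reg fp_offset comment → Spec_store_register_fp_rel source_reg temp_reg fp_offset comment (store_register_fp_rel source_reg temp_reg fp_offset comment)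

-- ===== LEMMAS AND PROOFS =====

-- A's ADD line as emitted in one loop iteration
def aAdd (t r : Int) (imm : String) : String :=
  ("ADD R" ++ PySem.Int.toStr t ++ ", R" ++ PySem.Int.toStr r ++ ", #" ++ imm) ++ "\n"

lemma srfrLoop_stop (t : Int) (a : List String) (r fp : Int)
    (h : -32 ≤ fp ∧ fp ≤ 31) : srfrLoop t a r fp = (a, r, fp) := by
  rw [srfrLoop]
  simp [within_6bit_twos_complement]
  omega

lemma srfrLoop_pos (k : Nat) : ∀ (fp t r : Int) (a : List String),
    31 + 15 * (k : Int) < fp → fp ≤ 46 + 15 * (k : Int) →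
    srfrLoop t a r fp =
      (a ++ (aAdd t r "15" :: List.replicate k (aAdd t t "15")), t, fp - 15 * ((k : Int) + 1)) := by
  induction k with
  | zero =>
    intro fp t r a h1 h2
    rw [srfrLoop]
    rw [if_neg (by simp [within_6bit_twos_complement]; omega), if_pos (by omega)]
    rw [srfrLoop_stop _ _ _ _ (by omega)]
    simp [pyAsm, aAdd, String.append_assoc]
  | succ k ih =>
    intro fp t r a h1 h2
    rw [srfrLoop]
    rw [if_neg (by simp [within_6bit_twos_complement]; push_cast at h1; omega), if_pos (by push_cast at h1; omega)]
    rw [ih (fp - 15) t t _ (by push_cast at h1 ⊢; omega) (by push_cast at h2 ⊢; omega)]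
    simp [pyAsm, aAdd, String.append_assoc, List.replicate_succ]
    omega

lemma srfrLoop_neg (k : Nat) : ∀ (fp t r : Int) (a : List String),
    fp < -32 - 16 * (k : Int) → -48 - 16 * (k : Int) ≤ fp →
    srfrLoop t a r fp =
      (a ++ (aAdd t r "-16" :: List.replicate k (aAdd t t "-16")), t, fp + 16 * ((k : Int) + 1)) := by
  induction k with
  | zero =>
    intro fp t r a h1 h2
    rw [srfrLoop]
    rw [if_neg (by simp [within_6bit_twos_complement]; omega), if_neg (by omega)]
    rw [srfrLoop_stop _ _ _ _ (by omega)]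
    simp [pyAsm, aAdd, String.append_assoc]
  | succ k ih =>
    intro fp t r a h1 h2
    rw [srfrLoop]
    rw [if_neg (by simp [within_6bit_twos_complement]; push_cast at h1; omega), if_neg (by push_cast at h1; omega)]
    rw [ih (fp + 16) t t _ (by push_cast at h1 ⊢; omega) (by push_cast at h2 ⊢; omega)]
    simp [pyAsm, aAdd, String.append_assoc, List.replicate_succ]
    omega

-- ===== VERDICT (by name: the statement is the Claim_ definition above) =====
theorem store_register_fp_rel_spec : Claim_equal_store_register_fp_rel := by
  intro s t fp c _ _
  unfold Spec_store_register_fp_rel store_register_fp_rel store_register_fp_rel_alt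
  by_cases hpos : fp > 31
  · -- exactly n+1 loop iterations where n = (fp - 32) / 15 (Nat division)
    rw [if_pos hpos]
    set n : Nat := (fp - 32).toNat / 15 with hn
    have hb1 : 31 + 15 * (n : Int) < fp := by omega
    have hb2 : fp ≤ 46 + 15 * (n : Int) := by omega
    have hk : -(PySem.Int.floordiv (31 - fp) 15) = (n : Int) + 1 := by
      have h31 : (31 - fp) = -(fp - 31) := by ring
      rw [h31, PySem.Int.neg_floordiv_neg_eq_iff_of_pos (by omega)]
      omega
    rw [hk, srfrLoop_pos n fp t 5 [] hb1 hb2]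
    simp [bSteps, pyAsm, aAdd, show PySem.Int.toStr (5:Int) = "5" from rfl, String.append_assoc]
    omega
  · by_cases hneg : fp < -32
    · rw [if_neg hpos, if_pos hneg]
      set n : Nat := (-33 - fp).toNat / 16 with hn
      have hb1 : fp < -32 - 16 * (n : Int) := by omega
      have hb2 : -48 - 16 * (n : Int) ≤ fp := by omega
      have hk : -(PySem.Int.floordiv (fp + 32) 16) = (n : Int) + 1 := by
        have h32 : (fp + 32) = -(-32 - fp) := by ring
        rw [h32, PySem.Int.neg_floordiv_neg_eq_iff_of_pos (by omega)]
        omega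
      rw [hk, srfrLoop_neg n fp t 5 [] hb1 hb2]
      simp [bSteps, pyAsm, aAdd, show PySem.Int.toStr (5:Int) = "5" from rfl, String.append_assoc]
      omega
    · rw [if_neg hpos, if_neg hneg]
      rw [srfrLoop_stop _ _ _ _ (by omega)]
      simp [bSteps, pyAsm, show PySem.Int.toStr (5:Int) = "5" from rfl, String.append_assoc]
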